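-- pv_equiv track=rewrite | github.com/pypi-data/pypi-code-119 | searchlogit/searchlogit-0.0.53-py3-none-any.whl/search.py | avail_features
-- ===== SOURCE A (Python) =====
-- def avail_features(asvars_ps, isvars_ps, rvars_ps, bcvars_ps,
--                    corvars_ps, isvarnames, asvarnames):
--     """
--     Generates lists of features that are availbale to select from for model development
--     Inputs:
--     (1) asvars_ps - list of prespecified asvars
--     (2) isvars_ps - list of prespecified isvars
--     (3) rvars_ps - list of vars and their prespecified coefficient distribution
--     (4) bcvars_ps - list of vars that include prespecified transformation
--     (5) corvars_ps - list of vars with prespecified correlation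
--     """
--     # available alternative-specific variables for selection
--     avail_asvars = [var for var in asvarnames if var not in asvars_ps]
--
--     # available individual-specific variables for selection
--     avail_isvars = [var for var in isvarnames if var not in isvars_ps]
--
--     # available variables for coeff distribution selection
--     avail_rvars = [var for var in asvarnames if var not in rvars_ps.keys()]
--
--     # available alternative-specific variables for transformation
--     avail_bcvars = [var for var in asvarnames if var not in bcvars_ps]
--
--     # available alternative-specific variables for correlation
--     avail_corvars = [var for var in asvarnames if var not in corvars_ps]
--
--     return (avail_asvars, avail_isvars, avail_rvars, avail_bcvars, avail_corvars)
-- ===== SOURCE B (Python) =====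
-- def _without(names, banned):
--     """Return names with every occurrence of each banned value deleted,
--     preserving the order (and duplicates) of the survivors."""
--     result = list(names)
--     for b in banned:
--         while b in result:
--             result.remove(b)
--     return result
--
--
-- def avail_features(asvars_ps, isvars_ps, rvars_ps, bcvars_ps,
--                    corvars_ps, isvarnames, asvarnames):
--     return (_without(asvarnames, asvars_ps),
--             _without(isvarnames, isvars_ps),
--             _without(asvarnames, rvars_ps.keys()),
--             _without(asvarnames, bcvars_ps),
--             _without(asvarnames, corvars_ps))
-- ===== Notes on version B (the rewrite author's own statement) =====
-- stated objective: alternative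
-- what changed: Instead of filtering each name list by membership tests, B copies the name list and iterates over the banned values, repeatedly deleting every occurrence of each banned value with list.remove; a shared _without helper replaces the four comprehensions.
import Mathlib
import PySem

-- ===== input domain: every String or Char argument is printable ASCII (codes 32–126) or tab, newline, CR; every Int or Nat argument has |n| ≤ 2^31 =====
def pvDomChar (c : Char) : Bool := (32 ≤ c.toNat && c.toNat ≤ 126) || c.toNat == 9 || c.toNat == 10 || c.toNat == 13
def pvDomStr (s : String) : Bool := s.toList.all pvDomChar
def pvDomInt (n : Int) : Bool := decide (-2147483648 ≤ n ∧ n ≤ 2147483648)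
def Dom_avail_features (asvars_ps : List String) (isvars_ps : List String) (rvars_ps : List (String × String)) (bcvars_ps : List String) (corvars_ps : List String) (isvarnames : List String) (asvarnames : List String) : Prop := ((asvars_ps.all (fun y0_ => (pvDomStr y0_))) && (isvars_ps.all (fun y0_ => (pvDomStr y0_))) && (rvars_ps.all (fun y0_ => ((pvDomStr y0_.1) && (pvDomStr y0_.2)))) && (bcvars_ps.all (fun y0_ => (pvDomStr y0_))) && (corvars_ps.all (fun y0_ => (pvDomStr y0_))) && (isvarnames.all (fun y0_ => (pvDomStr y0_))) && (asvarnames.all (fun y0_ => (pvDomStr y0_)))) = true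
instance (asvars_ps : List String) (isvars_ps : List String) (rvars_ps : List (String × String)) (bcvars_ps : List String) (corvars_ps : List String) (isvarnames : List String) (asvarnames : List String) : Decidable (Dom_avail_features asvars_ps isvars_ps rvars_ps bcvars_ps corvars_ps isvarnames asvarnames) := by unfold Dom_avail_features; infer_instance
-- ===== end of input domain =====

-- B replaces A's membership-filter comprehensions by a shared delete-by-value helper: copy the name list and remove every occurrence of each banned value (objective: alternative, same cost).

-- ===== PORT A =====
-- four separate comprehensions over asvarnames, plus one over isvarnames, in A's order
def avail_features (asvars_ps : List String) (isvars_ps : List String) (rvars_ps : List (String × String)) (bcvars_ps : List String) (corvars_ps : List String) (isvarnames : List String) (asvarnames : List String) : List (List String) :=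
  let avail_asvars := asvarnames.filter (fun v => !asvars_ps.contains v)
  let avail_isvars := isvarnames.filter (fun v => !isvars_ps.contains v)
  -- 'var not in rvars_ps.keys()': membership among the dict's keys
  let avail_rvars := asvarnames.filter (fun v => !(rvars_ps.map Prod.fst).contains v)
  let avail_bcvars := asvarnames.filter (fun v => !bcvars_ps.contains v)
  let avail_corvars := asvarnames.filter (fun v => !corvars_ps.contains v)
  [avail_asvars, avail_isvars, avail_rvars, avail_bcvars, avail_corvars]

-- ===== PORT B =====
-- 'while b in result: result.remove(b)' — repeated first-occurrence removal (PySem.List.remove?) until b is gone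
def pyRemoveLoop (res : List String) (b : String) : List String :=
  match h : PySem.List.remove? res b with
  | some r => pyRemoveLoop r b
  | none => res
termination_by res.length
decreasing_by
  have hb : b ∈ res := by
    by_contra hnb
    rw [(PySem.List.remove?_eq_none_iff res b).mpr hnb] at h
    simp at h
  have h2 : some (res.erase b) = some r := (PySem.List.remove?_eq_some_erase res b hb).symm.trans h
  injection h2 with h2
  subst h2
  have hl := List.length_erase_of_mem hb
  have hp := List.length_pos_of_mem hb
  omega

-- '_without(names, banned)': copy names, then delete all occurrences of each banned value
def pyWithout (names : List String) (banned : List String) : List String :=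
  banned.foldl (fun res b => pyRemoveLoop res b) names

def avail_features_alt (asvars_ps : List String) (isvars_ps : List String) (rvars_ps : List (String × String)) (bcvars_ps : List String) (corvars_ps : List String) (isvarnames : List String) (asvarnames : List String) : List (List String) :=
  [pyWithout asvarnames asvars_ps,
   pyWithout isvarnames isvars_ps,
   pyWithout asvarnames (rvars_ps.map Prod.fst),  -- rvars_ps.keys()
   pyWithout asvarnames bcvars_ps,
   pyWithout asvarnames corvars_ps]

-- ===== PRECONDITION & SPEC =====
def Spec_avail_features (asvars_ps : List String) (isvars_ps : List String) (rvars_ps : List (String × String)) (bcvars_ps : List String) (corvars_ps : List String) (isvarnames : List String) (asvarnames : List String) (out : List (List String)) : Prop := out = avail_features_alt asvars_ps isvars_ps rvars_ps bcvars_ps corvars_ps isvarnames asvarnames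
instance (asvars_ps : List String) (isvars_ps : List String) (rvars_ps : List (String × String)) (bcvars_ps : List String) (corvars_ps : List String) (isvarnames : List String) (asvarnames : List String) (out : List (List String)) : Decidable (Spec_avail_features asvars_ps isvars_ps rvars_ps bcvars_ps corvars_ps isvarnames asvarnames out) := by unfold Spec_avail_features; infer_instance

-- ===== CLAIM =====
def Claim_equal_avail_features : Prop := ∀ (asvars_ps : List String) (isvars_ps : List String) (rvars_ps : List (String × String)) (bcvars_ps : List String) (corvars_ps : List String) (isvarnames : List String) (asvarnames : List String), Dom_avail_features asvars_ps isvars_ps rvars_ps bcvars_ps corvars_ps isvarnames asvarnames → Spec_avail_features asvars_ps isvars_ps rvars_ps bcvars_ps corvars_ps isvarnames asvarnames (avail_features asvars_ps isvars_ps rvars_ps bcvars_ps corvars_ps isvarnames asvarnames)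

-- ===== LEMMAS AND PROOFS =====

-- erasing the first b does not change the b-free part
theorem erase_filter_ne (b : String) (xs : List String) :
    (xs.erase b).filter (fun v => v != b) = xs.filter (fun v => v != b) := by
  induction xs with
  | nil => simp
  | cons x xs ih =>
    by_cases hx : x = b
    · subst hx; simp [List.erase_cons_head]
    · rw [List.erase_cons_tail (by simp [hx])]
      simp [hx, ih]

-- the remove-until-gone loop deletes exactly the occurrences of b
theorem pyRemoveLoop_eq (res : List String) (b : String) :
    pyRemoveLoop res b = res.filter (fun v => v != b) := by
  rw [pyRemoveLoop.eq_def]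
  split
  · next r h =>
    have hb : b ∈ res := by
      by_contra hnb
      rw [(PySem.List.remove?_eq_none_iff res b).mpr hnb] at h
      simp at h
    have h2 : some (res.erase b) = some r := (PySem.List.remove?_eq_some_erase res b hb).symm.trans h
    injection h2 with h2
    subst h2
    rw [pyRemoveLoop_eq (res.erase b) b, erase_filter_ne]
  · next h =>
    have hnb : b ∉ res := (PySem.List.remove?_eq_none_iff res b).mp h
    exact (List.filter_eq_self.mpr (fun v hv => by simp; exact fun e => hnb (e ▸ hv))).symm
termination_by res.length
decreasing_by
  have hl := List.length_erase_of_mem hb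
  have hp := List.length_pos_of_mem hb
  omega

-- deleting every banned value is A's membership filter
theorem pyWithout_eq (names banned : List String) :
    pyWithout names banned = names.filter (fun v => !banned.contains v) := by
  unfold pyWithout
  induction banned generalizing names with
  | nil => simp
  | cons b bs ih =>
    rw [List.foldl_cons, ih, pyRemoveLoop_eq, List.filter_filter]
    apply List.filter_congr
    intro v _
    by_cases h1 : v = b
    · subst h1; simp
    · have h2 : b ≠ v := fun e => h1 e.symm
      simp [h1, Bool.and_comm]

-- ===== VERDICT =====
theorem avail_features_spec : Claim_equal_avail_features := by
  intro asvars_ps isvars_ps rvars_ps bcvars_ps corvars_ps isvarnames asvarnames _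
  show _ = _
  unfold avail_features avail_features_alt
  simp only [pyWithout_eq]
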